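-- pv_equiv track=rewrite | github.com/smallpythoncode/csci160 | program09/program09-2_kwj_csci160_spr22.py | indexOfMaxValue
-- ===== SOURCE A (Python) =====
-- def indexOfMaxValue (theList):
--     """Finds the maximum value of theList.
--
--     :param theList: The list in which to find the maximum
--     :type theList: list
--     :return: The maximum value and its indexes w/in the list
--     :rtype: tuple
--     """
--     max_value = theList[0]
--     max_index = []
--
--     for i in range(len(theList)):
--         if theList[i] == max_value:
--             max_index.append(i)
--         elif theList[i] > max_value:
--             max_index.clear()
--             max_value = theList[i]
--             max_index.append(i)
--
--     return max_value, max_index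
-- ===== SOURCE B (Python) =====
-- def indexOfMaxValue(theList):
--     """Find-then-collect: one pass for the max, one comprehension for its indices."""
--     max_value = theList[0]
--     for v in theList[1:]:
--         if v > max_value:
--             max_value = v
--     max_index = [i for i, v in enumerate(theList) if v == max_value]
--     return max_value, max_index
-- ===== Notes on version B (the rewrite author's own statement) =====
-- stated objective: simpler
-- what changed: B splits A's single maintain-and-clear scan into two plain passes: first find the maximum, then collect its indices with a comprehension; no index list is ever cleared or rebuilt mid-scan.
import Mathlib
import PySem

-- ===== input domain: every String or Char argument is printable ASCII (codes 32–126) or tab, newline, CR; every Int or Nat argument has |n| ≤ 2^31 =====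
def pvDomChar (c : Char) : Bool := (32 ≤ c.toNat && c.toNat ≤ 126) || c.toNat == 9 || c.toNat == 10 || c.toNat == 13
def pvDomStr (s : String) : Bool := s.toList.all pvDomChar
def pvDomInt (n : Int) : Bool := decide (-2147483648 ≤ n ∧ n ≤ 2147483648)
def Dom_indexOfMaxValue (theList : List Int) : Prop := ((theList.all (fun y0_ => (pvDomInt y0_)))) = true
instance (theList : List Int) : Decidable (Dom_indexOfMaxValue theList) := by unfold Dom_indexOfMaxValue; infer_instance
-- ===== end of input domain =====

-- B replaces A's single maintain-and-clear scan by two plain passes (find the max, then collect its indices); same O(n) cost, simpler.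


-- ===== PORT A =====
-- A's loop body on state (max_value, max_index) at index i
def pvStepA (theList : List Int) (s : Int × List Int) (i : Int) : Int × List Int :=
  let v := PySem.List.pyGetD theList i 0
  if v = s.1 then (s.1, s.2 ++ [i])
  else if v > s.1 then (v, [i])
  else s

def indexOfMaxValue (theList : List Int) : Int × List Int :=
  match theList with
  | [] => (0, [])  -- Python raises IndexError on theList[0]; excluded by Pre_
  | x :: _ =>
    (PySem.List.pyRange 0 theList.length 1).foldl (pvStepA theList) (x, [])

-- ===== PORT B =====
def indexOfMaxValue_alt (theList : List Int) : Int × List Int :=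
  match theList with
  | [] => (0, [])  -- Python raises IndexError on theList[0]; excluded by Pre_
  | x :: rest =>
    let m := rest.foldl (fun m v => if v > m then v else m) x
    (m, ((PySem.List.enumerate theList 0).filter (fun p => p.2 == m)).map (·.1))

-- ===== PRECONDITION & SPEC =====
-- Pre_ excludes only the empty list, on which Python A raises IndexError at theList[0].
def Pre_indexOfMaxValue (theList : List Int) : Prop := theList ≠ []
instance (theList : List Int) : Decidable (Pre_indexOfMaxValue theList) := by unfold Pre_indexOfMaxValue; infer_instance
def pvWitness_indexOfMaxValue : List Int := [1, 3, 2, 3]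

def Spec_indexOfMaxValue (theList : List Int) (out : Int × List Int) : Prop := out = indexOfMaxValue_alt theList
instance (theList : List Int) (out : Int × List Int) : Decidable (Spec_indexOfMaxValue theList out) := by unfold Spec_indexOfMaxValue; infer_instance

-- ===== CLAIM (what is proved, stated in full; the proofs are below) =====
def Claim_equal_indexOfMaxValue : Prop := ∀ (theList : List Int), Dom_indexOfMaxValue theList → Pre_indexOfMaxValue theList → Spec_indexOfMaxValue theList (indexOfMaxValue theList)

-- ===== LEMMAS AND PROOFS =====

-- B's if-shaped running maximum is List.foldl max
theorem foldl_maxstep_eq (t : List Int) (a : Int) :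
    t.foldl (fun m v => if v > m then v else m) a = t.foldl max a := by
  induction t generalizing a with
  | nil => rfl
  | cons v t ih =>
    simp only [List.foldl_cons, ih]
    congr 1
    split_ifs <;> omega

-- bridge: A's index loop over range(len(xs)) is a fold over enumerate of the tail
theorem bridge (xs : List Int) (f : (Int × List Int) → Int → Int → (Int × List Int)) :
    ∀ (k a : Nat), a + k = xs.length → ∀ (init : Int × List Int),
      (PySem.List.pyRange a xs.length 1).foldl (fun s i => f s i (PySem.List.pyGetD xs i 0)) init
      = (PySem.List.enumerate (xs.drop a) a).foldl (fun s p => f s p.1 p.2) init := by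
  intro k
  induction k with
  | zero =>
    intro a h init
    rw [PySem.List.pyRange_one_eq_nil (by omega), List.drop_of_length_le (by omega)]
    simp [PySem.List.enumerate]
  | succ k ih =>
    intro a h init
    have ha : a < xs.length := by omega
    rw [PySem.List.pyRange_one_cons (by exact_mod_cast ha),
        List.drop_eq_getElem_cons ha, PySem.List.enumerate_cons]
    simp only [List.foldl_cons]
    rw [PySem.List.pyGetD_natCast]
    have : (a : Int) + 1 = ((a + 1 : Nat) : Int) := by push_cast; ring
    rw [this, ih (a + 1) (by omega)]
    congr 2
    simp [List.getD, List.getElem?_eq_getElem ha]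

-- invariant of A's maintain-and-clear scan: state after a suffix = overall max so far and its indices
theorem invA :
    ∀ (ys : List Int) (a m : Int) (acc : List Int),
      (PySem.List.enumerate ys a).foldl
        (fun s p => if p.2 = s.1 then (s.1, s.2 ++ [p.1]) else if p.2 > s.1 then (p.2, [p.1]) else s)
        (m, acc)
      = (ys.foldl max m,
         (if ys.foldl max m = m then acc else [])
           ++ ((PySem.List.enumerate ys a).filter (fun p => p.2 == ys.foldl max m)).map (·.1)) := by
  intro ys
  induction ys with
  | nil => intro a m acc; simp [PySem.List.enumerate]
  | cons v t ih =>
    intro a m acc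
    rw [PySem.List.enumerate_cons]
    simp only [List.foldl_cons, List.filter_cons]
    rcases lt_trichotomy v m with hv | hv | hv
    · -- v < m : state unchanged, head filtered out
      have hM := (PySem.List.le_foldl_max t m).1
      rw [if_neg (by omega : ¬ v = m), if_neg (by omega : ¬ v > m), ih]
      have hmax : max m v = m := by omega
      simp only [hmax]
      have hb : (v == t.foldl max m) = false := by
        simp only [beq_eq_false_iff_ne, ne_eq]; omega
      rw [hb]
      simp
    · -- v = m : append the index
      rw [if_pos hv, ih]
      have hmax : max m v = m := by omega
      simp only [hmax]
      by_cases hMm : t.foldl max m = m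
      · have hb : (v == t.foldl max m) = true := by simp only [beq_iff_eq]; omega
        rw [hb]; simp [hMm]
      · have hb : (v == t.foldl max m) = false := by
          simp only [beq_eq_false_iff_ne, ne_eq]; omega
        rw [hb]; simp [hMm]
    · -- v > m : clear and restart from v
      rw [if_neg (by omega : ¬ v = m), if_pos (by omega : v > m), ih]
      have hM := (PySem.List.le_foldl_max t v).1
      have hmax : max m v = v := by omega
      simp only [hmax]
      rw [if_neg (by omega : ¬ t.foldl max v = m)]
      by_cases hMv : t.foldl max v = v
      · have hb : (v == t.foldl max v) = true := by simp only [beq_iff_eq]; omega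
        rw [hb]; simp [hMv]
      · have hb : (v == t.foldl max v) = false := by
          simp only [beq_eq_false_iff_ne, ne_eq]; omega
        rw [hb]; simp [hMv]

-- ===== VERDICT (by name: the statement is the Claim_ definition above) =====
theorem indexOfMaxValue_spec : Claim_equal_indexOfMaxValue := by
  intro theList _ hpre
  unfold Spec_indexOfMaxValue
  match theList with
  | [] => exact absurd rfl hpre
  | x :: rest =>
    show (PySem.List.pyRange 0 (x :: rest).length 1).foldl (pvStepA (x :: rest)) (x, []) = _
    have hstep : pvStepA (x :: rest) = fun s i =>
        (fun (s : Int × List Int) (i v : Int) =>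
          if v = s.1 then (s.1, s.2 ++ [i]) else if v > s.1 then (v, [i]) else s)
          s i (PySem.List.pyGetD (x :: rest) i 0) := rfl
    have hb := bridge (x :: rest)
      (fun (s : Int × List Int) (i v : Int) =>
        if v = s.1 then (s.1, s.2 ++ [i]) else if v > s.1 then (v, [i]) else s)
      (x :: rest).length 0 (by omega) (x, [])
    simp only [Nat.cast_zero, List.drop_zero] at hb
    rw [hstep, hb, invA]
    have hm : (x :: rest).foldl max x = rest.foldl max x := by
      simp [List.foldl_cons]
    show _ = (rest.foldl (fun m v => if v > m then v else m) x,
      ((PySem.List.enumerate (x :: rest) 0).filter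
        (fun p => p.2 == rest.foldl (fun m v => if v > m then v else m) x)).map (·.1))
    rw [foldl_maxstep_eq, hm]
    split_ifs <;> simp
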